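-- pv_equiv track=rewrite | github.com/megid0105/dino-ds | src/dino_ds/validators/repetition_gate_v41.py | _first_triplicate_bigram
-- ===== SOURCE A (Python) =====
-- from collections import Counter, deque
--
-- def _first_triplicate_bigram(tokens: list[str], window_tokens: int) -> tuple[str, str] | None:
--     if len(tokens) < 4:
--         return None
--
--     bigrams: list[tuple[str, str]] = []
--     for i in range(0, len(tokens) - 1):
--         bigrams.append((tokens[i], tokens[i + 1]))
--     if len(bigrams) < 3:
--         return None
--
--     window_bigrams = max(3, window_tokens - 1)
--     counts: Counter[tuple[str, str]] = Counter()
--     q: deque[tuple[str, str]] = deque()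
--     for bg in bigrams:
--         q.append(bg)
--         counts[bg] += 1
--         if len(q) > window_bigrams:
--             old = q.popleft()
--             counts[old] -= 1
--             if counts[old] <= 0:
--                 counts.pop(old, None)
--         if len(q) >= 3:
--             for key, n in counts.items():
--                 if n >= 3:
--                     return key
--     return None
-- ===== SOURCE B (Python) =====
-- def _first_triplicate_bigram(tokens: list[str], window_tokens: int) -> tuple[str, str] | None:
--     # Direct window-scan: a bigram triplicates at position j iff it occurs >= 3
--     # times among the last window_bigrams bigrams ending at j.
--     w = max(3, window_tokens - 1)
--     bigrams = list(zip(tokens, tokens[1:]))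
--     for j, bg in enumerate(bigrams):
--         if bigrams[max(0, j - w + 1): j + 1].count(bg) >= 3:
--             return bg
--     return None
-- ===== Notes on version B (the rewrite author's own statement) =====
-- stated objective: simpler
-- what changed: B drops A's incrementally maintained deque + Counter + per-step scan of the counter dict and instead, for each bigram position, directly counts that bigram in the current window slice of the bigram list (built with zip), relying on the fact that only the just-added bigram can have reached 3.
import Mathlib
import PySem

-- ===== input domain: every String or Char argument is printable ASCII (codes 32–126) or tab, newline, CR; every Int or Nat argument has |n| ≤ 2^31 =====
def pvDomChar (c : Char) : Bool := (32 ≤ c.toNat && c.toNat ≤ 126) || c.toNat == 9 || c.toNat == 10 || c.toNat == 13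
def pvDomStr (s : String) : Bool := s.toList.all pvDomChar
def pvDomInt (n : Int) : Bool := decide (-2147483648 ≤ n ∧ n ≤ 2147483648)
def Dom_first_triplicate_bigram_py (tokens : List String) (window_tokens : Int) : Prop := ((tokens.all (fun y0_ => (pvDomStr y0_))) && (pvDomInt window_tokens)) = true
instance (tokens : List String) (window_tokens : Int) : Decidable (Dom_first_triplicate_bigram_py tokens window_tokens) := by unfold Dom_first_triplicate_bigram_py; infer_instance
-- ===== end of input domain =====

-- B replaces A's incrementally maintained deque + Counter + per-step dict scan by a direct
-- count over the current window slice of the bigram list (objective: simpler, not faster).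

-- ===== PORT A =====
-- 'for key, n in counts.items(): if n >= 3: return key'
def aScan (counts : PySem.Dict (String × String) Int) : Option (String × String) :=
  (counts.items.find? (fun kv => 3 ≤ kv.2)).map (·.1)

-- the 'for bg in bigrams:' loop of A, state = (q, counts)
def aLoop (W : Int) : List (String × String) → List (String × String) →
    PySem.Dict (String × String) Int → Option (String × String)
  | [], _, _ => none
  | bg :: rest, q, counts =>
    let q1 := q ++ [bg]
    let counts1 := counts.insert bg (counts.getD bg 0 + 1)
    let st :=
      if W < (q1.length : Int) then
        match q1 with
        | old :: q2 =>
          let c := counts1.insert old (counts1.getD old 0 - 1)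
          (q2, if c.getD old 0 ≤ 0 then c.erase old else c)
        | [] => (q1, counts1)
      else (q1, counts1)
    if 3 ≤ st.1.length then
      match aScan st.2 with
      | some k => some k
      | none => aLoop W rest st.1 st.2
    else aLoop W rest st.1 st.2

def first_triplicate_bigram_py (tokens : List String) (window_tokens : Int) : Option (String × String) :=
  if tokens.length < 4 then none
  else
    let bigrams := (PySem.List.pyRange 0 ((tokens.length : Int) - 1) 1).foldl
      (fun acc i => acc ++ [(PySem.List.pyGetD tokens i "", PySem.List.pyGetD tokens (i + 1) "")]) []
    if bigrams.length < 3 then none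
    else aLoop (max 3 (window_tokens - 1)) bigrams [] PySem.Dict.empty

-- ===== PORT B =====
-- 'for j, bg in enumerate(bigrams): if bigrams[max(0, j - w + 1): j + 1].count(bg) >= 3: return bg'
def bLoop (bigrams : List (String × String)) (w : Int) :
    List (Int × (String × String)) → Option (String × String)
  | [] => none
  | (j, bg) :: rest =>
    if 3 ≤ (PySem.List.slice bigrams (some (max 0 (j - w + 1))) (some (j + 1))).count bg then
      some bg
    else bLoop bigrams w rest

def first_triplicate_bigram_py_alt (tokens : List String) (window_tokens : Int) : Option (String × String) :=
  let w := max 3 (window_tokens - 1)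
  let bigrams := tokens.zip (PySem.List.slice tokens (some 1) none)
  bLoop bigrams w (PySem.List.enumerate bigrams)

-- ===== PRECONDITION & SPEC =====
def Spec_first_triplicate_bigram_py (tokens : List String) (window_tokens : Int) (out : Option (String × String)) : Prop := out = first_triplicate_bigram_py_alt tokens window_tokens
instance (tokens : List String) (window_tokens : Int) (out : Option (String × String)) : Decidable (Spec_first_triplicate_bigram_py tokens window_tokens out) := by unfold Spec_first_triplicate_bigram_py; infer_instance

-- ===== CLAIM (what is proved, stated in full; the proofs are below) =====
def Claim_equal_first_triplicate_bigram_py : Prop := ∀ (tokens : List String) (window_tokens : Int), Dom_first_triplicate_bigram_py tokens window_tokens → Spec_first_triplicate_bigram_py tokens window_tokens (first_triplicate_bigram_py tokens window_tokens)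

-- ===== LEMMAS AND PROOFS =====

-- a dict whose items all carry the count of their key in q, and whose missing keys have count 0,
-- looks up to the count everywhere
theorem dict_getD_count (d : PySem.Dict (String × String) Int) (q : List (String × String))
    (hnd : d.keys.Nodup)
    (hv : ∀ p ∈ d.items, p.2 = (q.count p.1 : Int))
    (hcov : ∀ k, k ∉ d.keys → q.count k = 0) :
    ∀ k, d.getD k 0 = (q.count k : Int) := by
  intro k
  by_cases h : k ∈ d.keys
  · have : ∃ p ∈ d.items, p.1 = k := by
      simpa [PySem.Dict.keys] using h
    obtain ⟨p, hpm, hpk⟩ := this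
    have hval := hv p hpm
    have : d.get? k = some p.2 := by
      rw [PySem.Dict.get?_eq_some_iff_mem_items d k p.2 hnd]
      rw [← hpk]
      exact hpm
    rw [PySem.Dict.getD_eq_get?_getD, this]
    simpa [hpk] using hval
  · have hc : d.contains k = false := by
      by_contra hcc
      exact h ((PySem.Dict.contains_iff_mem_keys d k).1 (by simpa using hcc))
    rw [PySem.Dict.getD_of_not_contains d 0 hc, hcov k h]
    simp

-- erase = filter on the items list
theorem mem_items_erase (d : PySem.Dict (String × String) Int) (k : String × String)
    (p : (String × String) × Int) :
    p ∈ (d.erase k).items ↔ p ∈ d.items ∧ p.1 ≠ k := by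
  simp [PySem.Dict.erase, List.mem_filter]

theorem nodup_keys_erase (d : PySem.Dict (String × String) Int) (k : String × String)
    (hnd : d.keys.Nodup) : (d.erase k).keys.Nodup := by
  have hsub : (d.erase k).keys.Sublist d.keys := by
    simp only [PySem.Dict.keys, PySem.Dict.erase]
    exact List.Sublist.map _ List.filter_sublist
  exact hnd.sublist hsub

theorem mem_keys_erase (d : PySem.Dict (String × String) Int) (k k' : String × String) :
    k' ∈ (d.erase k).keys ↔ k' ∈ d.keys ∧ k' ≠ k := by
  simp only [PySem.Dict.keys, List.mem_map]
  constructor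
  · rintro ⟨p, hp, rfl⟩
    have := (mem_items_erase d k p).1 hp
    exact ⟨⟨p, this.1, rfl⟩, this.2⟩
  · rintro ⟨⟨p, hp, rfl⟩, hne⟩
    exact ⟨p, (mem_items_erase d k p).2 ⟨hp, hne⟩, rfl⟩

-- the per-step scan returns bg iff bg's window count reached 3
theorem aScan_eq (d : PySem.Dict (String × String) Int) (qf : List (String × String))
    (bg : String × String)
    (hnd : d.keys.Nodup)
    (hv : ∀ p ∈ d.items, p.2 = (qf.count p.1 : Int))
    (hcov : ∀ k, k ∉ d.keys → qf.count k = 0)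
    (hother : ∀ k, k ≠ bg → qf.count k ≤ 2) :
    aScan d = if 3 ≤ qf.count bg then some bg else none := by
  unfold aScan
  cases hfind : d.items.find? (fun kv => 3 ≤ kv.2) with
  | some kv =>
    have hp : 3 ≤ kv.2 := by simpa using List.find?_some hfind
    have hm := List.mem_of_find?_eq_some hfind
    have hval := hv kv hm
    have hk : kv.1 = bg := by
      by_contra hne
      have := hother kv.1 hne
      omega
    have hcnt : 3 ≤ qf.count bg := by
      rw [hk] at hval
      omega
    simp [hk, hcnt]
  | none =>
    have hall := List.find?_eq_none.mp hfind
    have hlt : ¬ 3 ≤ qf.count bg := by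
      intro h3'
      by_cases hbk : bg ∈ d.keys
      · have : ∃ p ∈ d.items, p.1 = bg := by simpa [PySem.Dict.keys] using hbk
        obtain ⟨p, hpm, hpk⟩ := this
        have h1 := hall p hpm
        have h2 := hv p hpm
        rw [hpk] at h2
        simp at h1
        omega
      · have := hcov bg hbk
        omega
    simp [hlt]

-- if the bigram list is too short, B's loop never fires
theorem bLoop_none (bigrams : List (String × String)) (w : Int)
    (hlen : bigrams.length < 3) :
    ∀ l, bLoop bigrams w l = none := by
  intro l
  induction l with
  | nil => rfl
  | cons p rest ih =>
    obtain ⟨j, bg⟩ := p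
    have h1 : (PySem.List.slice bigrams (some (max 0 (j - w + 1))) (some (j + 1))).count bg
        ≤ (PySem.List.slice bigrams (some (max 0 (j - w + 1))) (some (j + 1))).length :=
      List.count_le_length
    have h2 : (PySem.List.slice bigrams (some (max 0 (j - w + 1))) (some (j + 1))).length
        ≤ bigrams.length := by
      rw [PySem.List.length_slice]
      have := PySem.List.clampIdx_le bigrams.length (j + 1)
      omega
    simp only [bLoop]
    rw [if_neg (by omega)]
    exact ih

-- A's hand-built bigram list is B's zip
theorem bigrams_eq (tokens : List String) :
    (PySem.List.pyRange 0 ((tokens.length : Int) - 1) 1).foldl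
      (fun acc i => acc ++ [(PySem.List.pyGetD tokens i "", PySem.List.pyGetD tokens (i + 1) "")]) []
    = tokens.zip (PySem.List.slice tokens (some 1) none) := by
  rw [PySem.List.foldl_append_singleton_eq_map, PySem.List.slice_from_one]
  rw [PySem.List.pyRange_of_pos 0 _ Int.one_pos]
  apply List.ext_getElem
  · simp only [List.length_map, List.length_range, List.length_zip, List.length_tail, List.nil_append]
    split_ifs with h
    · omega
    · omega
  · intro i h1 h2
    have hi : i < tokens.length - 1 := by
      simpa [List.length_zip, List.length_tail] using h2
    simp only [List.nil_append, List.getElem_map, List.getElem_range, List.getElem_zip,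
      List.getElem_tail]
    have hc : (0 : Int) + 1 * (i : Int) = ((i : Nat) : Int) := by ring
    rw [hc, PySem.List.pyGetD_natCast]
    have hc2 : ((i : Nat) : Int) + 1 = (((i + 1 : Nat)) : Int) := by push_cast; ring
    rw [hc2, PySem.List.pyGetD_natCast]
    rw [List.getD_eq_getElem tokens "" (by omega), List.getD_eq_getElem tokens "" (by omega)]

-- main simulation: both loops agree under the window/counter invariant
theorem loop_eq (bigrams : List (String × String)) (W : Int) (Wn : Nat)
    (hW : W = (Wn : Int)) (h3 : 3 ≤ Wn) :
    ∀ (rest : List (String × String)) (j : Nat) (q : List (String × String))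
      (counts : PySem.Dict (String × String) Int),
      bigrams.drop j = rest →
      q = (bigrams.take j).drop (j - Wn) →
      counts.keys.Nodup →
      (∀ p ∈ counts.items, p.2 = (q.count p.1 : Int)) →
      (∀ k, k ∉ counts.keys → q.count k = 0) →
      (∀ k, q.count k ≤ 2) →
      aLoop W rest q counts = bLoop bigrams W (PySem.List.enumerate rest (j : Int)) := by
  intro rest
  induction rest with
  | nil =>
    intro j q counts _ _ _ _ _ _
    simp [aLoop, PySem.List.enumerate, bLoop]
  | cons bg rest ih =>
    intro j q counts hrest hq hnd hv hcov hle
    have hjlen : j < bigrams.length := by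
      by_contra hh
      rw [List.drop_eq_nil_of_le (by omega)] at hrest
      simp at hrest
    have hdrop := List.getElem_cons_drop hjlen
    rw [hrest, List.cons.injEq] at hdrop
    obtain ⟨hbg, hrest'⟩ := hdrop
    have htake : bigrams.take (j + 1) = bigrams.take j ++ [bg] := by
      rw [List.take_add_one, List.getElem?_eq_getElem hjlen]
      simp [hbg]
    have hlen_take : (bigrams.take j).length = j := by
      simp; omega
    have hq1 : q ++ [bg] = (bigrams.take (j + 1)).drop (j - Wn) := by
      rw [htake, List.drop_append_of_le_length (by omega), hq]
    have hlen_q : q.length = j - (j - Wn) := by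
      rw [hq]; simp [hlen_take]
    -- per-key lookup of counts
    have hgetD := dict_getD_count counts q hnd hv hcov
    -- counts after the increment
    have hnd1 : (counts.insert bg (counts.getD bg 0 + 1)).keys.Nodup :=
      PySem.Dict.nodup_keys_insert counts bg _ hnd
    have hcount1 : ∀ k, (q ++ [bg]).count k = q.count k + (if bg = k then 1 else 0) := by
      intro k
      simp [List.count_append, List.count_singleton]
    have hv1 : ∀ p ∈ (counts.insert bg (counts.getD bg 0 + 1)).items,
        p.2 = ((q ++ [bg]).count p.1 : Int) := by
      intro p hp
      rcases (PySem.Dict.mem_items_insert counts bg _ p).1 hp with h | ⟨hm, hne⟩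
      · rw [h]
        rw [hgetD bg, hcount1 bg]
        simp
      · rw [hv p hm, hcount1 p.1, if_neg (fun h : bg = p.1 => hne h.symm)]
        simp
    have hcov1 : ∀ k, k ∉ (counts.insert bg (counts.getD bg 0 + 1)).keys →
        (q ++ [bg]).count k = 0 := by
      intro k hk
      rw [PySem.Dict.mem_keys_insert] at hk
      push_neg at hk
      rw [hcount1 k, if_neg (fun h : bg = k => hk.1 h.symm), hcov k hk.2]
    have htake1 : (bigrams.take (j + 1)).length = j + 1 := by simp; omega
    have hwin : PySem.List.slice bigrams (some (max 0 ((j : Int) - W + 1))) (some ((j : Int) + 1))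
        = (bigrams.take (j + 1)).drop (j + 1 - Wn) := by
      have h1 : max 0 ((j : Int) - W + 1) = ((j + 1 - Wn : Nat) : Int) := by rw [hW]; omega
      have h2 : (j : Int) + 1 = ((j + 1 : Nat) : Int) := by push_cast; ring
      rw [h1, h2, PySem.List.slice_natCast, List.drop_take]
    rw [PySem.List.enumerate_cons]
    simp only [aLoop, bLoop]
    rw [hwin]
    by_cases hpop : Wn ≤ j
    · -- pop branch
      have hlq : q.length = Wn := by omega
      have hlq1 : (q ++ [bg]).length = Wn + 1 := by simp [hlq]
      have hcond : W < ((q ++ [bg]).length : Int) := by rw [hW, hlq1]; push_cast; omega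
      rw [if_pos hcond]
      obtain ⟨qh, qt, rfl⟩ : ∃ qh qt, q = qh :: qt := by
        cases q with
        | nil => simp at hlq; omega
        | cons a b => exact ⟨a, b, rfl⟩
      simp only [List.cons_append]
      have hq1m : (qh :: qt) ++ [bg] = qh :: (qt ++ [bg]) := by simp
      have hq2 : qt ++ [bg] = (bigrams.take (j + 1)).drop (j + 1 - Wn) := by
        have := congrArg List.tail hq1
        simp only [hq1m, List.tail_cons, List.tail_drop] at this
        rw [this]
        congr 1
        omega
      have hgetD1 := dict_getD_count _ _ hnd1 hv1 hcov1
      have hc1qh : ((qh :: qt) ++ [bg]).count qh = (qt ++ [bg]).count qh + 1 := by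
        rw [hq1m, List.count_cons_self]
      have hvalqh :
          (counts.insert bg (counts.getD bg 0 + 1)).getD qh 0 - 1
            = ((qt ++ [bg]).count qh : Int) := by
        rw [hgetD1 qh, hc1qh]
        push_cast
        ring
      have hnd_c : ((counts.insert bg (counts.getD bg 0 + 1)).insert qh
          ((counts.insert bg (counts.getD bg 0 + 1)).getD qh 0 - 1)).keys.Nodup :=
        PySem.Dict.nodup_keys_insert _ _ _ hnd1
      have hv_c : ∀ p ∈ ((counts.insert bg (counts.getD bg 0 + 1)).insert qh
          ((counts.insert bg (counts.getD bg 0 + 1)).getD qh 0 - 1)).items,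
          p.2 = ((qt ++ [bg]).count p.1 : Int) := by
        intro p hp
        rcases (PySem.Dict.mem_items_insert _ _ _ p).1 hp with h | ⟨hm, hne⟩
        · rw [h]
          exact hvalqh
        · rw [hv1 p hm, hq1m, List.count_cons, if_neg (fun h => hne (eq_of_beq h).symm)]
          simp
      have hcov_c : ∀ k, k ∉ ((counts.insert bg (counts.getD bg 0 + 1)).insert qh
          ((counts.insert bg (counts.getD bg 0 + 1)).getD qh 0 - 1)).keys →
          (qt ++ [bg]).count k = 0 := by
        intro k hk
        rw [PySem.Dict.mem_keys_insert] at hk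
        push_neg at hk
        have h0 := hcov1 k hk.2
        rw [hq1m, List.count_cons] at h0
        omega
      have hgz : ((counts.insert bg (counts.getD bg 0 + 1)).insert qh
          ((counts.insert bg (counts.getD bg 0 + 1)).getD qh 0 - 1)).getD qh 0
          = ((qt ++ [bg]).count qh : Int) := by
        rw [PySem.Dict.getD_insert_self]
        exact hvalqh
      have hguard : 3 ≤ (qt ++ [bg]).length := by
        have : (qt ++ [bg]).length = Wn := by
          have := hlq1
          simp only [List.cons_append, List.length_cons] at this
          omega
        omega
      have hother : ∀ k, k ≠ bg → (qt ++ [bg]).count k ≤ 2 := by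
        intro k hk
        have h1 : (qt ++ [bg]).count k = qt.count k := by
          simp [List.count_append, List.count_cons, hk, Ne.symm hk]
        have h2 : qt.count k ≤ (qh :: qt).count k := by
          rw [List.count_cons]
          omega
        have := hle k
        omega
      -- case on whether the decremented count hits zero (erase) or not
      by_cases hz : ((counts.insert bg (counts.getD bg 0 + 1)).insert qh
          ((counts.insert bg (counts.getD bg 0 + 1)).getD qh 0 - 1)).getD qh 0 ≤ 0
      · rw [if_pos hz]
        have hz' : (qt ++ [bg]).count qh = 0 := by
          rw [hgz] at hz
          omega
        have hnd_f := nodup_keys_erase _ qh hnd_c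
        have hv_f : ∀ p ∈ (((counts.insert bg (counts.getD bg 0 + 1)).insert qh
            ((counts.insert bg (counts.getD bg 0 + 1)).getD qh 0 - 1)).erase qh).items,
            p.2 = ((qt ++ [bg]).count p.1 : Int) := by
          intro p hp
          exact hv_c p ((mem_items_erase _ _ p).1 hp).1
        have hcov_f : ∀ k, k ∉ (((counts.insert bg (counts.getD bg 0 + 1)).insert qh
            ((counts.insert bg (counts.getD bg 0 + 1)).getD qh 0 - 1)).erase qh).keys →
            (qt ++ [bg]).count k = 0 := by
          intro k hk
          rw [mem_keys_erase] at hk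
          push_neg at hk
          by_cases hkq : k = qh
          · rw [hkq]; exact hz'
          · exact hcov_c k (fun hm => hkq (hk hm))
        rw [if_pos hguard, aScan_eq _ _ bg hnd_f hv_f hcov_f hother]
        by_cases hcnt : 3 ≤ (qt ++ [bg]).count bg
        · rw [if_pos hcnt, if_pos (by rw [← hq2]; exact hcnt)]
        · rw [if_neg hcnt, if_neg (by rw [← hq2]; exact hcnt)]
          have := ih (j + 1) (qt ++ [bg]) _ hrest' hq2 hnd_f hv_f hcov_f
            (fun k => by
              by_cases hk : k = bg
              · rw [hk]; omega
              · exact hother k hk)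
          rw [this]
          push_cast
          try rfl
      · rw [if_neg hz]
        rw [if_pos hguard, aScan_eq _ _ bg hnd_c hv_c hcov_c hother]
        by_cases hcnt : 3 ≤ (qt ++ [bg]).count bg
        · rw [if_pos hcnt, if_pos (by rw [← hq2]; exact hcnt)]
        · rw [if_neg hcnt, if_neg (by rw [← hq2]; exact hcnt)]
          have := ih (j + 1) (qt ++ [bg]) _ hrest' hq2 hnd_c hv_c hcov_c
            (fun k => by
              by_cases hk : k = bg
              · rw [hk]; omega
              · exact hother k hk)
          rw [this]
          push_cast
          try rfl
    · -- no-pop branch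
      have hjWn : j - Wn = 0 := by omega
      have hlq : q.length = j := by omega
      have hlq1 : (q ++ [bg]).length = j + 1 := by simp [hlq]
      have hcond : ¬ W < ((q ++ [bg]).length : Int) := by rw [hW, hlq1]; push_cast; omega
      rw [if_neg hcond]
      have hqf : q ++ [bg] = (bigrams.take (j + 1)).drop (j + 1 - Wn) := by
        rw [hq1]
        congr 1
        omega
      have hother : ∀ k, k ≠ bg → (q ++ [bg]).count k ≤ 2 := by
        intro k hk
        rw [hcount1 k, if_neg (fun h : bg = k => hk h.symm)]
        have := hle k
        omega
      by_cases hguard : 3 ≤ (q ++ [bg]).length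
      · rw [if_pos hguard, aScan_eq _ _ bg hnd1 hv1 hcov1 hother]
        by_cases hcnt : 3 ≤ (q ++ [bg]).count bg
        · rw [if_pos hcnt, if_pos (by rw [← hqf]; exact hcnt)]
        · rw [if_neg hcnt, if_neg (by rw [← hqf]; exact hcnt)]
          have := ih (j + 1) (q ++ [bg]) _ hrest' hqf hnd1 hv1 hcov1
            (fun k => by
              by_cases hk : k = bg
              · rw [hk]; omega
              · exact hother k hk)
          rw [this]
          push_cast
          try rfl
      · rw [if_neg hguard]
        have hcnt : ¬ 3 ≤ (q ++ [bg]).count bg := by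
          have := List.count_le_length (a := bg) (l := q ++ [bg])
          omega
        rw [if_neg (by rw [← hqf]; exact hcnt)]
        have := ih (j + 1) (q ++ [bg]) _ hrest' hqf hnd1 hv1 hcov1
          (fun k => by
            have := List.count_le_length (a := k) (l := q ++ [bg])
            omega)
        rw [this]
        push_cast
        try rfl


-- ===== VERDICT (by name: the statement is the Claim_ definition above) =====
theorem first_triplicate_bigram_py_spec : Claim_equal_first_triplicate_bigram_py := by
  intro tokens wt _
  show first_triplicate_bigram_py tokens wt = first_triplicate_bigram_py_alt tokens wt
  simp only [first_triplicate_bigram_py, first_triplicate_bigram_py_alt, bigrams_eq]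
  by_cases h4 : tokens.length < 4
  · rw [if_pos h4]
    have hlen : (tokens.zip (PySem.List.slice tokens (some 1) none)).length < 3 := by
      rw [PySem.List.slice_from_one]
      simp only [List.length_zip, List.length_tail]
      omega
    exact (bLoop_none _ _ hlen _).symm
  · rw [if_neg h4]
    have hlen : ¬ (tokens.zip (PySem.List.slice tokens (some 1) none)).length < 3 := by
      rw [PySem.List.slice_from_one]
      simp only [List.length_zip, List.length_tail]
      omega
    rw [if_neg hlen]
    have hw : max 3 (wt - 1) = (((max 3 (wt - 1)).toNat : Nat) : Int) := by omega
    have h3 : 3 ≤ (max 3 (wt - 1)).toNat := by omega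
    have := loop_eq (tokens.zip (PySem.List.slice tokens (some 1) none)) (max 3 (wt - 1)) _ hw h3
      (tokens.zip (PySem.List.slice tokens (some 1) none)) 0 [] PySem.Dict.empty
      (by simp) (by simp)
      (by simp [PySem.Dict.keys, PySem.Dict.empty])
      (by intro p hp; simp [PySem.Dict.empty] at hp)
      (by intro k _; simp)
      (by intro k; simp)
    simpa using this
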